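-- pv_equiv track=rewrite | github.com/vggm/Advent-of-Code | 2023/Day14/day14.py | slide_rocks
-- ===== SOURCE A (Python) =====
-- WALL = '#'
--
-- def slide_rocks(board: tuple[str]) -> tuple[str]:
--   tboard = list(map(''.join, zip(*board)))
--   new_board = []
--
--   for row in tboard:
--     new_rows = []
--     for group in row.split(WALL):
--       new_rows.append(''.join(sorted(group, reverse=True)))
--     new_board.append(WALL.join(new_rows))
--
--   return tuple(map(''.join, zip(*new_board)))
-- ===== SOURCE B (Python) =====
-- WALL = '#'
--
-- def slide_rocks(board):
--   new_cols = []
--   for col in zip(*board):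
--     cnt = {}
--     out = []
--     for ch in col:
--       if ch == WALL:
--         for c in sorted(cnt, reverse=True):
--           out.append(c * cnt[c])
--         out.append(WALL)
--         cnt = {}
--       else:
--         cnt[ch] = cnt.get(ch, 0) + 1
--     for c in sorted(cnt, reverse=True):
--       out.append(c * cnt[c])
--     new_cols.append(''.join(out))
--   return tuple(map(''.join, zip(*new_cols)))
-- ===== Notes on version B (the rewrite author's own statement) =====
-- stated objective: alternative
-- what changed: Per wall-separated segment, A comparison-sorts the characters (sorted(group, reverse=True) after transposing); B makes one counting pass per column with a dict counter and emits each segment's characters largest-first from the counts, never sorting the segment itself.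
import Mathlib
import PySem

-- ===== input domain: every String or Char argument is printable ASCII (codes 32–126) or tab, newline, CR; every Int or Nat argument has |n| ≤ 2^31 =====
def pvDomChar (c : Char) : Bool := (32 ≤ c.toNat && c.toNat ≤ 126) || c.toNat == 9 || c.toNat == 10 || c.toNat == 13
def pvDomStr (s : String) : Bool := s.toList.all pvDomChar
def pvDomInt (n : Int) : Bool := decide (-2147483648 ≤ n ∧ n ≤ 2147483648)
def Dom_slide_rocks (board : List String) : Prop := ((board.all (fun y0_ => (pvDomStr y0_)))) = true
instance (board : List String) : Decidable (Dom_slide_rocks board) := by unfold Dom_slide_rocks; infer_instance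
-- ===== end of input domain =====

-- B replaces the per-segment comparison sort of A by a counting pass: one dict counter per
-- wall-separated run, emitted largest character first (objective: alternative; not measured faster).

-- shared plumbing: Python's zip(*rows) joined back to strings — truncates to the shortest row
def pvZipStar (l : List (List Char)) : List (List Char) :=
  match l with
  | [] => []
  | r :: rs =>
    (List.range (rs.foldl (fun m s => min m s.length) r.length)).map
      (fun i => l.map (fun row => row.getD i ' '))

-- ===== PORT A =====
def slide_rocks (board : List String) : List String :=
  let tboard := pvZipStar (board.map String.toList)
  let new_board := tboard.map (fun row =>
    PySem.Chars.join ['#']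
      ((PySem.Chars.splitOn row ['#']).map (fun g => PySem.List.sorted g (fun c => c) true)))
  (pvZipStar new_board).map String.mk

-- ===== PORT B =====
-- ''.join(c * cnt[c] for c in sorted(cnt, reverse=True)); cnt[c] for a key of cnt is getD
def pvFlushD (d : PySem.Dict Char Int) : List Char :=
  (PySem.List.sorted d.keys (fun c => c) true).foldl
    (fun acc c => acc ++ List.replicate (d.getD c 0).toNat c) []

def pvColGo : List Char → List Char → PySem.Dict Char Int → List Char
  | [], out, d => out ++ pvFlushD d
  | c :: cs, out, d =>
    if c = '#' then pvColGo cs (out ++ pvFlushD d ++ ['#']) PySem.Dict.empty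
    else pvColGo cs out (d.insert c (d.getD c 0 + 1))

def slide_rocks_alt (board : List String) : List String :=
  let new_cols := (pvZipStar (board.map String.toList)).map
    (fun col => pvColGo col [] PySem.Dict.empty)
  (pvZipStar new_cols).map String.mk

-- ===== PRECONDITION & SPEC =====
def Spec_slide_rocks (board : List String) (out : List String) : Prop := out = slide_rocks_alt board
instance (board : List String) (out : List String) : Decidable (Spec_slide_rocks board out) := by unfold Spec_slide_rocks; infer_instance

-- ===== CLAIM (what is proved, stated in full; the proofs are below) =====
def Claim_equal_slide_rocks : Prop := ∀ (board : List String), Dom_slide_rocks board → Spec_slide_rocks board (slide_rocks board)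

-- ===== LEMMAS AND PROOFS =====

-- simple recursive specification of str.split('#')
def pvSplit : List Char → List (List Char)
  | [] => [[]]
  | c :: cs =>
    if c = '#' then [] :: pvSplit cs
    else
      match pvSplit cs with
      | [] => [[c]]
      | h :: t => (c :: h) :: t

lemma pvSplit_ne_nil (cs : List Char) : pvSplit cs ≠ [] := by
  cases cs with
  | nil => simp [pvSplit]
  | cons c cs =>
    simp only [pvSplit]
    split
    · simp
    · split <;> simp

lemma pvGo_eq (cs : List Char) : ∀ (fuel : Nat) (cur : List Char) (acc : List (List Char)),
    cs.length < fuel →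
    PySem.Chars.splitOn.go ['#'] fuel cs cur acc
      = acc.reverse ++ (cur.reverse ++ (pvSplit cs).headI) :: (pvSplit cs).tail := by
  induction cs with
  | nil =>
    intro fuel cur acc h
    cases fuel with
    | zero => omega
    | succ f =>
      rw [PySem.Chars.splitOn.go]
      simp [pvSplit]
      omega
  | cons c cs ih =>
    intro fuel cur acc h
    cases fuel with
    | zero => simp at h
    | succ f =>
      rw [PySem.Chars.splitOn.go]
      simp only [List.isPrefixOf, List.length_cons] at *
      by_cases hc : c = '#'
      · subst hc
        simp only [BEq.rfl, Bool.true_and, if_pos]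
        have hd : List.drop (List.length ([] : List Char) + 1) ('#' :: cs) = cs := by simp
        rw [hd, ih f [] _ (by omega)]
        cases hs : pvSplit cs with
        | nil => exact absurd hs (pvSplit_ne_nil cs)
        | cons h' t' => simp [pvSplit, hs]
      · have : (c == '#') = false := by simp [hc]
        rw [if_neg (by simp [Ne.symm hc])]
        rw [ih f (c :: cur) _ (by omega)]
        cases hs : pvSplit cs with
        | nil => exact absurd hs (pvSplit_ne_nil cs)
        | cons h' t' => simp [pvSplit, hs, hc]

lemma pvSplitOn_eq (cs : List Char) : PySem.Chars.splitOn cs ['#'] = pvSplit cs := by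
  rw [PySem.Chars.splitOn, pvGo_eq cs (cs.length + 1) [] [] (by omega)]
  cases hs : pvSplit cs with
  | nil => exact absurd hs (pvSplit_ne_nil cs)
  | cons h' t' => simp

lemma pvJoin_cons (h : List Char) (t : List (List Char)) :
    PySem.Chars.join ['#'] (h :: t) = h ++ t.flatMap (fun g => '#' :: g) := by
  induction t generalizing h with
  | nil => simp [PySem.Chars.join_singleton]
  | cons g t ih => rw [PySem.Chars.join_cons_cons, ih g]; simp

lemma pvFlatMap_update_perm {f f' : Char → List Char} {x : Char} {a : Char}
    (l : List Char) (hnd : l.Nodup) (hx : x ∈ l)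
    (h1 : ∀ c ∈ l, c ≠ x → f' c = f c) (h2 : f' x = a :: f x) :
    (l.flatMap f').Perm (a :: l.flatMap f) := by
  induction l with
  | nil => simp at hx
  | cons c cs ih =>
    rw [List.flatMap_cons, List.flatMap_cons]
    by_cases hcx : c = x
    · subst hcx
      have hnotin : c ∉ cs := (List.nodup_cons.mp hnd).1
      have hfix : cs.flatMap f' = cs.flatMap f :=
        List.flatMap_congr (fun d hd => h1 d (List.mem_cons_of_mem _ hd) (fun hdx => hnotin (hdx ▸ hd)))
      rw [h2, hfix]
      simp
    · have hx' : x ∈ cs := by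
        cases hx with
        | head => exact absurd rfl hcx
        | tail _ hmem => exact hmem
      have h1' : f' c = f c := h1 c (List.mem_cons_self) hcx
      rw [h1']
      exact List.Perm.trans
        (List.Perm.append_left (f c) (ih (List.nodup_cons.mp hnd).2 hx'
          (fun d hd hdx => h1 d (List.mem_cons_of_mem _ hd) hdx)))
        List.perm_middle

lemma pvEofList_perm (seg : List Char) :
    ((PySem.Set.ofList seg).flatMap (fun c => List.replicate (seg.count c) c)).Perm seg := by
  induction seg using List.reverseRecOn with
  | nil => simp
  | append_singleton seg x ih =>
    rw [PySem.Set.ofList_append_singleton]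
    by_cases hx : x ∈ seg
    · rw [PySem.Set.add_of_mem ((PySem.Set.mem_ofList seg x).mpr hx)]
      refine List.Perm.trans
        (pvFlatMap_update_perm (a := x) (x := x)
          (f := fun c => List.replicate (seg.count c) c) _ (PySem.Set.nodup_ofList seg)
          ((PySem.Set.mem_ofList seg x).mpr hx)
          (fun c _ hcx => by
            simp [List.count_append, Ne.symm hcx])
          (by simp [List.count_append, List.replicate_succ]))
        ?_
      exact List.Perm.trans (List.Perm.cons x ih) (List.perm_append_singleton x seg).symm
    · rw [PySem.Set.add_of_not_mem (fun hm => hx ((PySem.Set.mem_ofList seg x).mp hm))]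
      rw [List.flatMap_append]
      have hfix : (PySem.Set.ofList seg).flatMap (fun c => List.replicate ((seg ++ [x]).count c) c)
          = (PySem.Set.ofList seg).flatMap (fun c => List.replicate (seg.count c) c) := by
        refine List.flatMap_congr (fun c hc => ?_)
        have hcx : c ≠ x := fun hcx => hx (hcx ▸ (PySem.Set.mem_ofList seg c).mp hc)
        simp [List.count_append, Ne.symm hcx]
      have hxcount : (seg ++ [x]).count x = 1 := by
        simp [List.count_append, List.count_eq_zero_of_not_mem hx]
      rw [hfix]
      simp only [List.flatMap_cons, List.flatMap_nil, hxcount, List.replicate_one, List.append_nil]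
      exact List.Perm.append ih (List.Perm.refl [x])

lemma pvFlushD_counter_eq_flatMap (g : List Char) :
    pvFlushD (PySem.Dict.counter g)
      = (PySem.List.sorted (PySem.Set.ofList g) (fun c => c) true).flatMap
          (fun c => List.replicate (g.count c) c) := by
  rw [pvFlushD, PySem.List.foldl_append_eq_flatMap, PySem.Dict.keys_counter]
  simp [PySem.Dict.getD_counter]

lemma pvSeg_eq (g : List Char) :
    PySem.List.sorted g (fun c => c) true = pvFlushD (PySem.Dict.counter g) := by
  have hkey : ∀ a b : Char, b ≤ a ↔ (fun c : Char => -(c.toNat : Int)) a ≤ (fun c : Char => -(c.toNat : Int)) b := by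
    intro a b
    simp only [Char.le_def, UInt32.le_iff_toNat_le, Char.toNat]
    omega
  refine PySem.List.eq_of_perm_of_pairwise_le_of_injective
    (fun c : Char => -(c.toNat : Int)) ?_ ?_ ?_ ?_
  · intro a b hab
    simp only [neg_inj, Nat.cast_inj] at hab
    exact Char.ext (UInt32.toNat_inj.mp hab)
  · -- permutation: both sides rearrange g
    refine (PySem.List.sorted_perm g _ true).trans ?_
    rw [pvFlushD_counter_eq_flatMap]
    refine List.Perm.symm ?_
    refine List.Perm.trans ?_ (pvEofList_perm g)
    exact List.Perm.flatMap (PySem.List.sorted_perm _ _ true) (fun a _ => List.Perm.refl _)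
  · exact (PySem.List.sorted_pairwise_rev g (fun c => c)).imp (fun {a b} h => (hkey a b).mp h)
  · -- the counting emission is sorted in descending order
    rw [pvFlushD_counter_eq_flatMap, List.flatMap_def]
    refine List.pairwise_flatten.mpr ⟨?_, ?_⟩
    · intro l hl
      rcases List.mem_map.mp hl with ⟨c, _, rfl⟩
      exact List.pairwise_replicate.mpr (Or.inr (le_refl _))
    · refine List.pairwise_map.mpr ?_
      refine (PySem.List.sorted_pairwise_rev (PySem.Set.ofList g) (fun c => c)).imp ?_
      intro k1 k2 hle x hx y hy
      rw [List.eq_of_mem_replicate hx, List.eq_of_mem_replicate hy]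
      exact (hkey k1 k2).mp hle

lemma pvColGo_eq (cs : List Char) : ∀ (out pre : List Char),
    pvColGo cs out (pre.foldl (fun d x => d.insert x (d.getD x 0 + 1)) PySem.Dict.empty)
      = out ++ pvFlushD (PySem.Dict.counter (pre ++ (pvSplit cs).headI))
          ++ ((pvSplit cs).tail).flatMap (fun g => '#' :: pvFlushD (PySem.Dict.counter g)) := by
  induction cs with
  | nil =>
    intro out pre
    simp [pvColGo, pvSplit, PySem.Dict.foldl_insert_getD_add_one_eq_counter]
  | cons c cs ih =>
    intro out pre
    by_cases hc : c = '#'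
    · subst hc
      rw [pvColGo, if_pos rfl]
      have h2 := ih (out ++ pvFlushD (pre.foldl (fun d x => d.insert x (d.getD x 0 + 1)) PySem.Dict.empty) ++ ['#']) []
      simp only [List.foldl_nil] at h2
      rw [h2]
      cases hs : pvSplit cs with
      | nil => exact absurd hs (pvSplit_ne_nil cs)
      | cons h' t' =>
        simp [pvSplit, hs, PySem.Dict.foldl_insert_getD_add_one_eq_counter,
          List.append_assoc]
    · rw [pvColGo, if_neg hc]
      have h2 := ih out (pre ++ [c])
      simp only [List.foldl_append, List.foldl_cons, List.foldl_nil] at h2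
      rw [h2]
      cases hs : pvSplit cs with
      | nil => exact absurd hs (pvSplit_ne_nil cs)
      | cons h' t' => simp [pvSplit, hs, hc, List.append_assoc]

lemma pvCol_eq (col : List Char) :
    pvColGo col [] PySem.Dict.empty
      = PySem.Chars.join ['#']
          ((PySem.Chars.splitOn col ['#']).map (fun g => PySem.List.sorted g (fun c => c) true)) := by
  rw [pvSplitOn_eq]
  have h2 := pvColGo_eq col [] []
  simp only [List.foldl_nil] at h2
  rw [h2]
  cases hs : pvSplit col with
  | nil => exact absurd hs (pvSplit_ne_nil col)
  | cons h' t' =>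
    rw [List.map_cons, pvJoin_cons, List.flatMap_map]
    simp only [List.headI, List.tail, List.nil_append, pvSeg_eq]

-- ===== VERDICT (by name: the statement is the Claim_ definition above) =====
theorem slide_rocks_spec : Claim_equal_slide_rocks := by
  intro board _
  unfold Spec_slide_rocks slide_rocks slide_rocks_alt
  have : ∀ l : List (List Char),
      l.map (fun col => pvColGo col [] PySem.Dict.empty)
        = l.map (fun row =>
            PySem.Chars.join ['#']
              ((PySem.Chars.splitOn row ['#']).map (fun g => PySem.List.sorted g (fun c => c) true))) := by
    intro l
    exact List.map_congr_left (fun col _ => pvCol_eq col)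
  dsimp only
  rw [this]
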